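-- pv_equiv track=rewrite | github.com/Bijay-Thakur/rag-sec-10k | src/ingestion/validate_sections.py | _group_by_part
-- ===== SOURCE A (Python) =====
-- def _group_by_part(sections):
--     groups = {}
--     order = []
--     for s in sections:
--         key = s["part"]
--         if key not in groups:
--             order.append(key)
--             groups[key] = []
--         groups[key].append(s)
--     return [(p, groups[p]) for p in order]
-- ===== SOURCE B (Python) =====
-- def _group_by_part(sections):
--     order = list(dict.fromkeys(s["part"] for s in sections))
--     return [(p, [s for s in sections if s["part"] == p]) for p in order]
-- ===== Notes on version B (the rewrite author's own statement) =====
-- stated objective: simpler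
-- what changed: Replaces the single accumulation pass with mutable dict-of-lists state by computing the ordered distinct parts first (dict.fromkeys) and then building each group with a separate filtering pass over the input.
import Mathlib
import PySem

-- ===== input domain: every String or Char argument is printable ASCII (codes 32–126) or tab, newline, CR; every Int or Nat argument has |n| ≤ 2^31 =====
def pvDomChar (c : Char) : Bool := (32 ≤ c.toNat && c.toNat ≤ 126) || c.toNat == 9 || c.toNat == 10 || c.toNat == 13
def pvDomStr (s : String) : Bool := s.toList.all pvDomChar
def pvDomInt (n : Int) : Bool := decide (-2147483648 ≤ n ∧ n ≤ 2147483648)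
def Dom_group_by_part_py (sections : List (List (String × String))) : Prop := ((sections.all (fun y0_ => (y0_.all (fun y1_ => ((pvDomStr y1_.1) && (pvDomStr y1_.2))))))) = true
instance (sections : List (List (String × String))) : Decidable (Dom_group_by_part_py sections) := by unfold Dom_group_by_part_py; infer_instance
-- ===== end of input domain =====

-- B computes the ordered distinct parts first and builds each group by a separate
-- filtering pass, instead of A's single pass over mutable dict-of-lists state (objective: simpler).


-- s["part"] on the association-list dict s; total form of the lookup (Pre_ guarantees the key is present)
def partKey (s : List (String × String)) : String :=
  ((PySem.Dict.mk s).get? "part").getD ""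

-- ===== PORT A =====
-- one iteration of A's loop: conditional (order.append; groups[key]=[]) then groups[key].append(s)
def aStep (st : PySem.Dict String (List (List (String × String))) × List String)
    (s : List (String × String)) :
    PySem.Dict String (List (List (String × String))) × List String :=
  let key := partKey s
  let st' := if st.1.contains key then st else (st.1.insert key [], st.2 ++ [key])
  (st'.1.modify key [] (fun g => g ++ [s]), st'.2)

def group_by_part_py (sections : List (List (String × String))) : List (String × (List (List (String × String)))) :=
  let st := sections.foldl aStep (PySem.Dict.empty, [])
  st.2.map (fun p => (p, st.1.getD p []))

-- ===== PORT B =====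
def group_by_part_py_alt (sections : List (List (String × String))) : List (String × (List (List (String × String)))) :=
  let order := PySem.List.dedup (sections.map partKey)   -- list(dict.fromkeys(...))
  order.map (fun p => (p, sections.filter (fun s => partKey s == p)))

-- ===== PRECONDITION & SPEC =====
-- Pre_ excludes exactly the inputs where some section lacks a "part" key, on which Python A raises KeyError.
def Pre_group_by_part_py (sections : List (List (String × String))) : Prop :=
  ∀ s ∈ sections, ((PySem.Dict.mk s).get? "part").isSome
instance (sections : List (List (String × String))) : Decidable (Pre_group_by_part_py sections) := by unfold Pre_group_by_part_py; infer_instance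

def pvWitness_group_by_part_py : (List (List (String × String))) :=
  [[("part", "I"), ("title", "overview")], [("part", "II")], [("part", "I"), ("title", "risk")]]

def Spec_group_by_part_py (sections : List (List (String × String))) (out : List (String × (List (List (String × String))))) : Prop := out = group_by_part_py_alt sections
instance (sections : List (List (String × String))) (out : List (String × (List (List (String × String))))) : Decidable (Spec_group_by_part_py sections out) := by unfold Spec_group_by_part_py; infer_instance

-- ===== CLAIM (what is proved, stated in full; the proofs are below) =====
def Claim_equal_group_by_part_py : Prop := ∀ (sections : List (List (String × String))), Dom_group_by_part_py sections → Pre_group_by_part_py sections → Spec_group_by_part_py sections (group_by_part_py sections)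

-- ===== LEMMAS AND PROOFS =====

-- the conditional insert of [] before the append changes nothing: modify already inserts on a fresh key
theorem ifInsert_modify (d : PySem.Dict String (List (List (String × String)))) (k : String)
    (s : List (String × String)) :
    ((if d.contains k then d else (d.insert k ([] : List (List (String × String))))).modify k [] (fun g => g ++ [s]))
      = d.modify k [] (fun g => g ++ [s]) := by
  by_cases h : d.contains k
  · simp [h]
  · simp only [h, Bool.false_eq_true, if_false]
    simp [PySem.Dict.modify, PySem.Dict.getD_insert_self, PySem.Dict.insert_insert_self,
      PySem.Dict.getD_of_not_contains, h]

-- loop invariant: A's fold splits into independent groups/order folds as long as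
-- groups-membership and order-membership agree
theorem aLoop_char (xs : List (List (String × String))) :
    ∀ (g : PySem.Dict String (List (List (String × String)))) (ord : List String),
    (∀ k, g.contains k = ord.contains k) →
    xs.foldl aStep (g, ord) =
      (xs.foldl (fun d s => d.modify (partKey s) [] (fun l => l ++ [s])) g,
       xs.foldl (fun o s => PySem.Set.add o (partKey s)) ord) := by
  induction xs with
  | nil => intro g ord _; rfl
  | cons s xs ih =>
    intro g ord h
    have hstep : aStep (g, ord) s =
        (g.modify (partKey s) [] (fun l => l ++ [s]), PySem.Set.add ord (partKey s)) := by
      by_cases hc : g.contains (partKey s)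
      · have hm : partKey s ∈ ord := by
          have := h (partKey s); rw [hc] at this
          simpa [List.contains_iff_mem] using this.symm
        simp [aStep, hc, PySem.Set.add_of_mem hm]
      · have hm : partKey s ∉ ord := by
          have := h (partKey s)
          simp only [Bool.not_eq_true] at hc
          rw [hc] at this
          simpa [List.contains_iff_mem] using this.symm
        simp only [aStep, hc, Bool.false_eq_true, if_false]
        rw [PySem.Set.add_of_not_mem hm]
        have := ifInsert_modify g (partKey s) s
        simp only [hc, Bool.false_eq_true, if_false] at this
        simp [this]
    have hinv : ∀ k, (g.modify (partKey s) [] (fun l => l ++ [s])).contains k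
        = (PySem.Set.add ord (partKey s)).contains k := by
      intro k
      rw [PySem.Dict.contains_modify, h k, PySem.Set.add_eq_ite]
      by_cases hmem : partKey s ∈ ord <;> by_cases hk : k = partKey s <;>
        simp [hmem, hk, List.mem_append]
    simp only [List.foldl_cons]
    rw [hstep, ih _ _ hinv]

-- the accumulated group for a part p is the filter of the input on that part
theorem groups_getD (sections : List (List (String × String))) (p : String) :
    (sections.foldl (fun d s => d.modify (partKey s) [] (fun l => l ++ [s]))
        (PySem.Dict.empty : PySem.Dict String (List (List (String × String))))).getD p []
      = sections.filter (fun s => partKey s == p) := by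
  have := PySem.Dict.getD_foldl_modify_append
    (sections.map (fun s => (partKey s, s)))
    (PySem.Dict.empty : PySem.Dict String (List (List (String × String)))) p
  rw [List.foldl_map] at this
  simpa [List.filter_map, Function.comp_def] using this

-- ===== VERDICT (by name: the statement is the Claim_ definition above) =====
theorem group_by_part_py_spec : Claim_equal_group_by_part_py := by
  intro sections _ _
  unfold Spec_group_by_part_py group_by_part_py group_by_part_py_alt
  rw [aLoop_char sections PySem.Dict.empty [] (by intro k; simp [PySem.Dict.contains_empty])]
  have hord : sections.foldl (fun o s => PySem.Set.add o (partKey s)) ([] : List String)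
      = PySem.List.dedup (sections.map partKey) := by
    rw [← PySem.Set.update_map_eq_foldl_add, PySem.Set.update_nil_left]
    rfl
  simp only [hord]
  apply List.map_congr_left
  intro p _
  simp [groups_getD]
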